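-- pv_equiv track=rewrite | github.com/mevljas/Programming-1 | Exercises/Namespaces,What_are_variables, Functions/Naloge-dodatne_algoritmične.py | postnina
-- ===== SOURCE A (Python) =====
-- def postnina(n):
--     cene = []
--     for a in range(1, n + 1):
--         for b in range(1, n + 1):
--             for c in range(1, n + 1):
--                 if a * b * c == n:
--                     cene.append(a + b + c)
--     return min(cene)
-- ===== SOURCE B (Python) =====
-- def postnina(n):
--     best = None
--     for a in range(1, n + 1):
--         if n % a == 0:
--             m = n // a
--             for b in range(1, m + 1):
--                 if m % b == 0:
--                     s = a + b + m // b
--                     if best is None or s < best: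
--                         best = s
--     return best
-- ===== Notes on version B (the rewrite author's own statement) =====
-- stated objective: faster
-- what changed: replaced the cubic triple loop that collects all sums into a list and takes min() by a divisor-pair enumeration (a over divisors of n, b over divisors of n/a, c determined as (n/a)//b) with a running minimum and no intermediate list
-- outside the precondition, e.g. on postnina(0): A raises ValueError, B returns None
import Mathlib
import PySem

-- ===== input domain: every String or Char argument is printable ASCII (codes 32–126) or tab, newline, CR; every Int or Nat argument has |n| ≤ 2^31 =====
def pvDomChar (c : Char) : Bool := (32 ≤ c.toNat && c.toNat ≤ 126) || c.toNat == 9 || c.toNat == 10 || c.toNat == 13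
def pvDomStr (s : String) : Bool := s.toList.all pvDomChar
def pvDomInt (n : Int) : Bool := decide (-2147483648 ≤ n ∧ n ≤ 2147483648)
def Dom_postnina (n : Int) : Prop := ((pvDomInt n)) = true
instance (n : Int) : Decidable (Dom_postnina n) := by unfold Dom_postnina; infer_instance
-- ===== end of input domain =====

-- B replaces A's O(n^3) triple loop + list + min() by a divisor-pair enumeration with a running minimum (asymptotically faster).

-- ===== PORT A =====
def postnina (n : Int) : Int :=
  let cene := (PySem.List.pyRange 1 (n+1) 1).foldl (fun acc a =>
    (PySem.List.pyRange 1 (n+1) 1).foldl (fun acc b =>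
      (PySem.List.pyRange 1 (n+1) 1).foldl (fun acc c =>
        if a * b * c = n then acc ++ [a + b + c] else acc) acc) acc) []
  -- Python's min(cene) raises ValueError on an empty list; Pre_ (1 ≤ n) guarantees cene ≠ []
  (PySem.List.min? cene (fun x => x)).getD 0

-- ===== PORT B =====
def postnina_alt (n : Int) : Int :=
  let best := (PySem.List.pyRange 1 (n+1) 1).foldl (fun best a =>
    if PySem.Int.mod n a = 0 then
      let m := PySem.Int.floordiv n a
      (PySem.List.pyRange 1 (m+1) 1).foldl (fun best b =>
        if PySem.Int.mod m b = 0 then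
          let s := a + b + PySem.Int.floordiv m b
          match best with
          | none => some s
          | some v => if s < v then some s else some v
        else best) best
    else best) (none : Option Int)
  -- Python B returns None (no Int) when the loop never fires; Pre_ (1 ≤ n) guarantees best is set
  best.getD 0

-- ===== PRECONDITION & SPEC =====
-- Pre_ excludes n ≤ 0: there A's cene stays empty and min([]) raises ValueError (and B returns None).
def Pre_postnina (n : Int) : Prop := 1 ≤ n
instance (n : Int) : Decidable (Pre_postnina n) := by unfold Pre_postnina; infer_instance
def pvWitness_postnina : Int := 12

def Spec_postnina (n : Int) (out : Int) : Prop := out = postnina_alt n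
instance (n : Int) (out : Int) : Decidable (Spec_postnina n out) := by unfold Spec_postnina; infer_instance

-- ===== CLAIM =====
def Claim_equal_postnina : Prop := ∀ (n : Int), Dom_postnina n → Pre_postnina n → Spec_postnina n (postnina n)

-- ===== LEMMAS AND PROOFS =====

-- A's candidate list, in flatMap form
def LA (n : Int) : List Int :=
  (PySem.List.pyRange 1 (n+1) 1).flatMap (fun a =>
    (PySem.List.pyRange 1 (n+1) 1).flatMap (fun b =>
      ((PySem.List.pyRange 1 (n+1) 1).filter (fun c => decide (a * b * c = n))).map
        (fun c => a + b + c)))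

-- B's candidate list, in flatMap form
def LB (n : Int) : List Int :=
  (PySem.List.pyRange 1 (n+1) 1).flatMap (fun a =>
    if PySem.Int.mod n a = 0 then
      ((PySem.List.pyRange 1 (PySem.Int.floordiv n a + 1) 1).filter
          (fun b => decide (PySem.Int.mod (PySem.Int.floordiv n a) b = 0))).map
        (fun b => a + b + PySem.Int.floordiv (PySem.Int.floordiv n a) b)
    else [])

-- the running-minimum step of B
def minStep (best : Option Int) (s : Int) : Option Int :=
  match best with
  | none => some s
  | some v => if s < v then some s else some v

lemma minStep_some (v s : Int) : minStep (some v) s = some (min v s) := by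
  rcases lt_or_ge s v with h | h
  · rw [min_eq_right h.le]; simp [minStep, h]
  · rw [min_eq_left h]; simp [minStep, not_lt.mpr h]

lemma foldl_minStep_some (l : List Int) (v : Int) :
    l.foldl minStep (some v) = some (l.foldl min v) := by
  induction l generalizing v with
  | nil => rfl
  | cons y t ih => simp only [List.foldl_cons, minStep_some, ih]

lemma foldl_minStep_none (l : List Int) :
    l.foldl minStep none = PySem.List.min? l (fun x => x) := by
  cases l with
  | nil => exact ((PySem.List.min?_eq_none_iff ([] : List Int) (fun x => x)).mpr rfl).symm
  | cons x t =>
      rw [PySem.List.min?_id_cons]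
      show List.foldl minStep (minStep none x) t = _
      rw [show minStep none x = some x from rfl, foldl_minStep_some]

lemma postnina_eq_minLA (n : Int) :
    postnina n = ((PySem.List.min? (LA n) (fun x => x)).getD 0) := by
  unfold postnina LA
  simp only [PySem.List.foldl_append_ite, PySem.List.foldl_append_eq_flatMap, List.nil_append]

lemma foldl_LB_shape (n : Int) :
    (LB n).foldl minStep none =
    (PySem.List.pyRange 1 (n+1) 1).foldl (fun best a =>
      if PySem.Int.mod n a = 0 then
        let m := PySem.Int.floordiv n a
        (PySem.List.pyRange 1 (m+1) 1).foldl (fun best b =>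
          if PySem.Int.mod m b = 0 then
            let s := a + b + PySem.Int.floordiv m b
            minStep best s
          else best) best
      else best) (none : Option Int) := by
  unfold LB
  rw [List.foldl_flatMap]
  apply PySem.List.foldl_congr_mem
  intro acc a _
  by_cases h : PySem.Int.mod n a = 0
  · simp only [h, if_pos]
    rw [List.foldl_map, List.foldl_filter]
    simp only [decide_eq_true_eq]
  · simp [h]

lemma postnina_alt_eq_minLB (n : Int) :
    postnina_alt n = ((PySem.List.min? (LB n) (fun x => x)).getD 0) := by
  unfold postnina_alt
  rw [← foldl_minStep_none, foldl_LB_shape]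
  rfl

lemma mem_LA (n x : Int) :
    x ∈ LA n ↔ ∃ a b c : Int, 1 ≤ a ∧ a ≤ n ∧ 1 ≤ b ∧ b ≤ n ∧ 1 ≤ c ∧ c ≤ n ∧
      a * b * c = n ∧ x = a + b + c := by
  unfold LA
  simp only [List.mem_flatMap, List.mem_map, List.mem_filter,
    PySem.List.mem_pyRange_one, decide_eq_true_eq]
  constructor
  · rintro ⟨a, ⟨ha1, ha2⟩, b, ⟨hb1, hb2⟩, c, ⟨⟨hc1, hc2⟩, hp⟩, hx⟩
    exact ⟨a, b, c, ha1, by omega, hb1, by omega, hc1, by omega, hp, hx.symm⟩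
  · rintro ⟨a, b, c, ha1, ha2, hb1, hb2, hc1, hc2, hp, hx⟩
    exact ⟨a, ⟨ha1, by omega⟩, b, ⟨hb1, by omega⟩, c, ⟨⟨hc1, by omega⟩, hp⟩, hx.symm⟩

lemma mem_LB (n x : Int) (_hn : 1 ≤ n) :
    x ∈ LB n ↔ ∃ a b c : Int, 1 ≤ a ∧ a ≤ n ∧ 1 ≤ b ∧ b ≤ n ∧ 1 ≤ c ∧ c ≤ n ∧
      a * b * c = n ∧ x = a + b + c := by
  unfold LB
  simp only [List.mem_flatMap, List.mem_ite_nil_right, List.mem_map, List.mem_filter,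
    PySem.List.mem_pyRange_one, decide_eq_true_eq]
  constructor
  · rintro ⟨a, ⟨ha1, ha2⟩, hmod, b, ⟨⟨hb1, hb2⟩, hbmod⟩, hx⟩
    have hane : a ≠ 0 := by omega
    obtain ⟨k, hk⟩ := (PySem.Int.mod_eq_zero_iff_dvd n a).mp hmod
    have hfd : PySem.Int.floordiv n a = k := by
      rw [PySem.Int.floordiv_eq_ediv_of_pos (by omega : (0:Int) < a), hk,
        Int.mul_ediv_cancel_left k hane]
    rw [hfd] at hbmod hb2 hx
    have hbne : b ≠ 0 := by omega
    obtain ⟨c, hc⟩ := (PySem.Int.mod_eq_zero_iff_dvd k b).mp hbmod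
    have hfd2 : PySem.Int.floordiv k b = c := by
      rw [PySem.Int.floordiv_eq_ediv_of_pos (by omega : (0:Int) < b), hc,
        Int.mul_ediv_cancel_left c hbne]
    rw [hfd2] at hx
    have hk1 : 1 ≤ k := by nlinarith
    have hc1 : 1 ≤ c := by nlinarith
    have hkn : k ≤ n := by nlinarith
    have hck : c ≤ k := by nlinarith
    have hcn : c ≤ n := by omega
    refine ⟨a, b, c, ha1, by omega, hb1, by omega, hc1, ?_, by rw [hk, hc]; ring, hx.symm⟩
    · nlinarith
  · rintro ⟨a, b, c, ha1, ha2, hb1, hb2, hc1, hc2, hp, hx⟩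
    have hane : a ≠ 0 := by omega
    have hbne : b ≠ 0 := by omega
    have hn_eq : n = a * (b * c) := by rw [← hp]; ring
    have hmod : PySem.Int.mod n a = 0 :=
      (PySem.Int.mod_eq_zero_iff_dvd n a).mpr ⟨b * c, hn_eq⟩
    have hfd : PySem.Int.floordiv n a = b * c := by
      rw [PySem.Int.floordiv_eq_ediv_of_pos (by omega : (0:Int) < a), hn_eq,
        Int.mul_ediv_cancel_left _ hane]
    have hfd2 : PySem.Int.floordiv (b * c) b = c := by
      rw [PySem.Int.floordiv_eq_ediv_of_pos (by omega : (0:Int) < b),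
        Int.mul_ediv_cancel_left c hbne]
    refine ⟨a, ⟨ha1, by omega⟩, hmod, b, ⟨⟨hb1, ?_⟩, ?_⟩, ?_⟩
    · rw [hfd]; nlinarith
    · rw [hfd]
      exact (PySem.Int.mod_eq_zero_iff_dvd (b * c) b).mpr ⟨c, rfl⟩
    · rw [hfd, hfd2, hx]

lemma LA_ne_nil (n : Int) (hn : 1 ≤ n) : LA n ≠ [] := by
  intro h
  have hm : (1 + 1 + n) ∈ LA n :=
    (mem_LA n (1 + 1 + n)).mpr ⟨1, 1, n, le_refl 1, hn, le_refl 1, hn, hn, le_refl n,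
      by ring, rfl⟩
  rw [h] at hm
  exact absurd hm (List.not_mem_nil)

lemma LB_ne_nil (n : Int) (hn : 1 ≤ n) : LB n ≠ [] := by
  intro h
  have hm : (1 + 1 + n) ∈ LB n :=
    (mem_LB n (1 + 1 + n) hn).mpr ⟨1, 1, n, le_refl 1, hn, le_refl 1, hn, hn, le_refl n,
      by ring, rfl⟩
  rw [h] at hm
  exact absurd hm (List.not_mem_nil)

-- ===== VERDICT =====
theorem postnina_spec : Claim_equal_postnina := by
  intro n _ hn
  unfold Spec_postnina
  rw [postnina_eq_minLA, postnina_alt_eq_minLB]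
  obtain ⟨v1, hv1⟩ : ∃ v, PySem.List.min? (LA n) (fun x => x) = some v := by
    cases h : PySem.List.min? (LA n) (fun x => x) with
    | none => exact absurd ((PySem.List.min?_eq_none_iff (LA n) (fun x => x)).mp h) (LA_ne_nil n hn)
    | some v => exact ⟨v, rfl⟩
  obtain ⟨v2, hv2⟩ : ∃ v, PySem.List.min? (LB n) (fun x => x) = some v := by
    cases h : PySem.List.min? (LB n) (fun x => x) with
    | none => exact absurd ((PySem.List.min?_eq_none_iff (LB n) (fun x => x)).mp h) (LB_ne_nil n hn)
    | some v => exact ⟨v, rfl⟩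
  rw [hv1, hv2]
  have h1 := PySem.List.min?_mem hv1
  have h2 := PySem.List.min?_mem hv2
  have h12 : v1 ∈ LB n := (mem_LB n v1 hn).mpr ((mem_LA n v1).mp h1)
  have h21 : v2 ∈ LA n := (mem_LA n v2).mpr ((mem_LB n v2 hn).mp h2)
  have le1 := PySem.List.min?_isMin hv1 v2 h21
  have le2 := PySem.List.min?_isMin hv2 v1 h12
  simp only [Option.getD_some]
  exact le_antisymm le1 le2
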